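-- pv_equiv track=rewrite | github.com/MaynulIslam/AllCalculate | transform_pages.py | extract_div_block
-- ===== SOURCE A (Python) =====
-- def extract_div_block(html, class_attr):
--     """Return (start, end, inner_html) for the FIRST div with the given class,
--     correctly handling nested divs."""
--     start_tag = f'<div class="{class_attr}">'
--     start = html.find(start_tag)
--     if start == -1:
--         return None, None, None
--
--     pos = start + len(start_tag)
--     depth = 1
--     while depth > 0 and pos < len(html):
--         next_open  = html.find('<div', pos)
--         next_close = html.find('</div>', pos)
--
--         if next_close == -1:
--             break
--         if next_open != -1 and next_open < next_close:
--             depth += 1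
--             pos = next_open + 4          # skip past '<div'
--         else:
--             depth -= 1
--             if depth == 0:
--                 end    = next_close + 6  # include '</div>'
--                 inner  = html[start + len(start_tag): next_close]
--                 return start, end, inner
--             pos = next_close + 6
--
--     return None, None, None
-- ===== SOURCE B (Python) =====
-- def extract_div_block(html, class_attr):
--     """Single left-to-right character scan with a depth counter, instead of
--     repeated html.find jumps for the next open/close tag."""
--     start_tag = f'<div class="{class_attr}">'
--     start = html.find(start_tag)
--     if start == -1:
--         return None, None, None
--
--     inner_start = start + len(start_tag)
--     depth = 1
--     i = inner_start
--     n = len(html)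
--     while i < n:
--         if html.startswith('</div>', i):
--             depth -= 1
--             if depth == 0:
--                 return start, i + 6, html[inner_start:i]
--             i += 6
--         elif html.startswith('<div', i):
--             depth += 1
--             i += 4
--         else:
--             i += 1
--     return None, None, None
-- ===== Notes on version B (the rewrite author's own statement) =====
-- stated objective: alternative
-- what changed: Replaces the pair of html.find('<div'/'</div>', pos) calls per iteration (with jump-to-next-event logic) by a single left-to-right character scan that tests startswith at each position and maintains the nesting depth.
import Mathlib
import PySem

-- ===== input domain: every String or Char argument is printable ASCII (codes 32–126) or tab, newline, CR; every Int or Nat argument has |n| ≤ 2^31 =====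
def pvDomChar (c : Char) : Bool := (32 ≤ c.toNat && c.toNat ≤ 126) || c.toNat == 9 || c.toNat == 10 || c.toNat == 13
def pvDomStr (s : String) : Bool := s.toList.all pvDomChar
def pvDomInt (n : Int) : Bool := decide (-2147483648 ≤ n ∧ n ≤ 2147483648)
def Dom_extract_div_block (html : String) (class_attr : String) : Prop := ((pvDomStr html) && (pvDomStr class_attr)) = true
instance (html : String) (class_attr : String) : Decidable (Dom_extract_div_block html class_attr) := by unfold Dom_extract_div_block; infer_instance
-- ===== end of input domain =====

-- B replaces A's per-iteration pair of find('<div'/'</div>', pos) jumps by a single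
-- left-to-right character scan maintaining the nesting depth (objective: alternative).

-- ===== PORT A =====
-- '<div' and '</div>' as character lists
def pvOpen4 : List Char := ['<', 'd', 'i', 'v']
def pvClose6 : List Char := ['<', '/', 'd', 'i', 'v', '>']
-- f'<div class="{class_attr}">'
def pvStartTag (ca : List Char) : List Char :=
  ['<', 'd', 'i', 'v', ' ', 'c', 'l', 'a', 's', 's', '=', '"'] ++ ca ++ ['"', '>']

-- A's while loop: state (pos, depth); html.find(sub, pos) is PySem.Chars.findFrom
def loopA (s : List Char) (startIdx innerStart pos : Nat) (depth : Int) :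
    Option Int × Option Int × Option String :=
  if hp : 0 < depth ∧ pos < s.length then
    if hc : PySem.Chars.findFrom s pvClose6 (pos : Int) none = -1 then
      (none, none, none)
    else if ho : PySem.Chars.findFrom s pvOpen4 (pos : Int) none ≠ -1 ∧
        PySem.Chars.findFrom s pvOpen4 (pos : Int) none <
          PySem.Chars.findFrom s pvClose6 (pos : Int) none then
      loopA s startIdx innerStart
        ((PySem.Chars.findFrom s pvOpen4 (pos : Int) none).toNat + 4) (depth + 1)
    else if depth - 1 = 0 then
      (some (startIdx : Int),
        some (PySem.Chars.findFrom s pvClose6 (pos : Int) none + 6),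
        some (String.ofList (PySem.List.slice s (some (innerStart : Int))
          (some (PySem.Chars.findFrom s pvClose6 (pos : Int) none)))))
    else
      loopA s startIdx innerStart
        ((PySem.Chars.findFrom s pvClose6 (pos : Int) none).toNat + 6) (depth - 1)
  else (none, none, none)
termination_by s.length - pos
decreasing_by
  · have h1 := (PySem.Chars.findFrom_natCast_spec s pvOpen4 pos (by omega) ho.1).1
    omega
  · have h1 := (PySem.Chars.findFrom_natCast_spec s pvClose6 pos (by omega) hc).1
    omega

def extract_div_block (html : String) (class_attr : String) :
    Option Int × Option Int × Option String :=
  let s := html.toList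
  let tag := pvStartTag class_attr.toList
  if PySem.Chars.find s tag = -1 then (none, none, none)
  else
    let start := (PySem.Chars.find s tag).toNat
    loopA s start (start + tag.length) (start + tag.length) 1

-- ===== PORT B =====
-- B's while loop: one pass, index i; html.startswith(p, i) is 'p <+:' the drop at i
def loopB (s : List Char) (startIdx innerStart i : Nat) (depth : Int) :
    Option Int × Option Int × Option String :=
  if hi : i < s.length then
    if PySem.Chars.startswith (s.drop i) pvClose6 then
      if depth - 1 = 0 then
        (some (startIdx : Int), some ((i : Int) + 6),
          some (String.ofList (PySem.List.slice s (some (innerStart : Int)) (some (i : Int)))))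
      else loopB s startIdx innerStart (i + 6) (depth - 1)
    else if PySem.Chars.startswith (s.drop i) pvOpen4 then
      loopB s startIdx innerStart (i + 4) (depth + 1)
    else loopB s startIdx innerStart (i + 1) depth
  else (none, none, none)
termination_by s.length - i
decreasing_by all_goals omega

def extract_div_block_alt (html : String) (class_attr : String) :
    Option Int × Option Int × Option String :=
  let s := html.toList
  let tag := pvStartTag class_attr.toList
  if PySem.Chars.find s tag = -1 then (none, none, none)
  else
    let start := (PySem.Chars.find s tag).toNat
    loopB s start (start + tag.length) (start + tag.length) 1

-- ===== PRECONDITION & SPEC =====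
def Spec_extract_div_block (html : String) (class_attr : String) (out : Option Int × Option Int × Option String) : Prop := out = extract_div_block_alt html class_attr
instance (html : String) (class_attr : String) (out : Option Int × Option Int × Option String) : Decidable (Spec_extract_div_block html class_attr out) := by unfold Spec_extract_div_block; infer_instance

-- ===== CLAIM (what is proved, stated in full; the proofs are below) =====
def Claim_equal_extract_div_block : Prop := ∀ (html : String) (class_attr : String), Dom_extract_div_block html class_attr → Spec_extract_div_block html class_attr (extract_div_block html class_attr)

-- ===== LEMMAS AND PROOFS =====

-- findFrom = -1 means: no occurrence at any position ≥ pos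
lemma no_hit_of_findFrom_eq_neg_one (s sub : List Char) (pos j : Nat)
    (hk : pos ≤ s.length)
    (h : PySem.Chars.findFrom s sub (pos : Int) none = -1)
    (hj : pos ≤ j) : ¬ sub <+: s.drop j := by
  intro hpre
  have hinf : sub <:+: s.drop pos := by
    have hdz : s.drop j = (s.drop pos).drop (j - pos) := by
      rw [List.drop_drop]; congr 1; omega
    have hsfx : (s.drop pos).drop (j - pos) <:+ s.drop pos := List.drop_suffix _ _
    rw [hdz] at hpre
    exact hpre.isInfix.trans hsfx.isInfix
  exact ((PySem.Chars.findFrom_natCast_eq_neg_one_iff s sub pos hk).mp h) hinf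

-- if no tag event occurs in [pos, m), B's scan walks from pos to m unchanged
lemma loopB_skip (s : List Char) (a b : Nat) (d : Int) :
    ∀ k pos m, m - pos ≤ k → pos ≤ m →
    (∀ j, pos ≤ j → j < m → ¬ pvClose6 <+: s.drop j ∧ ¬ pvOpen4 <+: s.drop j) →
    loopB s a b pos d = loopB s a b m d := by
  intro k
  induction k with
  | zero =>
    intro pos m hle hpm _
    have : pos = m := by omega
    rw [this]
  | succ k ih =>
    intro pos m hle hpm hno
    by_cases hpe : pos = m
    · rw [hpe]
    have hlt : pos < m := by omega
    by_cases hin : pos < s.length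
    · have hcl : PySem.Chars.startswith (s.drop pos) pvClose6 = false := by
        rw [Bool.eq_false_iff]
        intro hs
        exact (hno pos le_rfl hlt).1 ((PySem.Chars.startswith_iff _ _).mp hs)
      have hop : PySem.Chars.startswith (s.drop pos) pvOpen4 = false := by
        rw [Bool.eq_false_iff]
        intro hs
        exact (hno pos le_rfl hlt).2 ((PySem.Chars.startswith_iff _ _).mp hs)
      rw [loopB, dif_pos hin, hcl, hop]
      simp only [Bool.false_eq_true, if_false]
      exact ih (pos + 1) m (by omega) (by omega)
        (fun j h1 h2 => hno j (by omega) h2)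
    · rw [loopB, dif_neg hin, loopB, dif_neg (by omega : ¬ m < s.length)]

-- if '</div>' never occurs at or after pos, B's scan returns the None triple
lemma loopB_noclose (s : List Char) (a b : Nat) :
    ∀ k pos (d : Int), s.length - pos ≤ k →
    (∀ j, pos ≤ j → ¬ pvClose6 <+: s.drop j) →
    loopB s a b pos d = (none, none, none) := by
  intro k
  induction k with
  | zero =>
    intro pos d hle _
    rw [loopB, dif_neg (by omega : ¬ pos < s.length)]
  | succ k ih =>
    intro pos d hle hno
    by_cases hin : pos < s.length
    · have hcl : PySem.Chars.startswith (s.drop pos) pvClose6 = false := by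
        rw [Bool.eq_false_iff]
        intro hs
        exact hno pos le_rfl ((PySem.Chars.startswith_iff _ _).mp hs)
      rw [loopB, dif_pos hin, hcl]
      simp only [Bool.false_eq_true, if_false]
      by_cases hop : PySem.Chars.startswith (s.drop pos) pvOpen4
      · rw [if_pos hop]
        exact ih (pos + 4) (d + 1) (by omega) (fun j h1 => hno j (by omega))
      · rw [if_neg hop]
        exact ih (pos + 1) d (by omega) (fun j h1 => hno j (by omega))
    · rw [loopB, dif_neg hin]

-- the core: A's jump loop and B's scan loop agree (for positive depth)
lemma loopA_eq_loopB (s : List Char) (a b : Nat) :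
    ∀ k pos (d : Int), s.length - pos ≤ k → 0 < d →
    loopA s a b pos d = loopB s a b pos d := by
  intro k
  induction k with
  | zero =>
    intro pos d hle hd
    rw [loopA, dif_neg (by omega : ¬ (0 < d ∧ pos < s.length)),
      loopB, dif_neg (by omega : ¬ pos < s.length)]
  | succ k ih =>
    intro pos d hle hd
    by_cases hin : pos < s.length
    · by_cases hc : PySem.Chars.findFrom s pvClose6 (pos : Int) none = -1
      · rw [loopA, dif_pos ⟨hd, hin⟩, dif_pos hc]
        exact (loopB_noclose s a b (k + 1) pos d hle
          (fun j hj => no_hit_of_findFrom_eq_neg_one s pvClose6 pos j (by omega) hc hj)).symm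
      · have hcs := PySem.Chars.findFrom_natCast_spec s pvClose6 pos (by omega) hc
        set nc := PySem.Chars.findFrom s pvClose6 (pos : Int) none with hncdef
        have hncnn : 0 ≤ nc := le_trans (by omega) hcs.1
        by_cases ho : PySem.Chars.findFrom s pvOpen4 (pos : Int) none ≠ -1 ∧
            PySem.Chars.findFrom s pvOpen4 (pos : Int) none < nc
        · -- next event is an open tag
          have hos := PySem.Chars.findFrom_natCast_spec s pvOpen4 pos (by omega) ho.1
          set no := PySem.Chars.findFrom s pvOpen4 (pos : Int) none with hnodef
          have hA : loopA s a b pos d = loopA s a b (no.toNat + 4) (d + 1) := by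
            rw [loopA, dif_pos ⟨hd, hin⟩, dif_neg hc, dif_pos ho]
          have hskip : loopB s a b pos d = loopB s a b no.toNat d := by
            apply loopB_skip s a b d (no.toNat - pos) pos no.toNat le_rfl (by omega)
            intro j h1 h2
            exact ⟨hcs.2.2 j h1 (by omega), hos.2.2 j h1 h2⟩
          have hoplen : no.toNat < s.length := by
            have hl := hos.2.1.length_le
            simp only [List.length_drop] at hl
            have h4 : pvOpen4.length = 4 := rfl
            rw [h4] at hl
            omega
          have hnocl : PySem.Chars.startswith (s.drop no.toNat) pvClose6 = false := by
            rw [Bool.eq_false_iff]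
            intro hs
            exact hcs.2.2 no.toNat (by omega) (by omega) ((PySem.Chars.startswith_iff _ _).mp hs)
          have hopsw : PySem.Chars.startswith (s.drop no.toNat) pvOpen4 = true :=
            (PySem.Chars.startswith_iff _ _).mpr hos.2.1
          rw [hA, hskip, loopB, dif_pos hoplen, hnocl]
          simp only [Bool.false_eq_true, if_false]
          rw [hopsw, if_pos rfl]
          exact ih (no.toNat + 4) (d + 1) (by omega) (by omega)
        · -- next event is a close tag
          have hnoge : ∀ j, pos ≤ j → j < nc.toNat → ¬ pvOpen4 <+: s.drop j := by
            intro j h1 h2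
            by_cases hoe : PySem.Chars.findFrom s pvOpen4 (pos : Int) none = -1
            · exact no_hit_of_findFrom_eq_neg_one s pvOpen4 pos j (by omega) hoe h1
            · have hos := PySem.Chars.findFrom_natCast_spec s pvOpen4 pos (by omega) hoe
              have : nc ≤ PySem.Chars.findFrom s pvOpen4 (pos : Int) none := by
                by_contra hcon
                exact ho ⟨hoe, by omega⟩
              exact hos.2.2 j h1 (by omega)
          have hskip : loopB s a b pos d = loopB s a b nc.toNat d := by
            apply loopB_skip s a b d (nc.toNat - pos) pos nc.toNat le_rfl (by omega)
            intro j h1 h2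
            exact ⟨hcs.2.2 j h1 h2, hnoge j h1 h2⟩
          have hcllen : nc.toNat < s.length := by
            have hl := hcs.2.1.length_le
            simp only [List.length_drop] at hl
            have h6 : pvClose6.length = 6 := rfl
            rw [h6] at hl
            omega
          have hclsw : PySem.Chars.startswith (s.drop nc.toNat) pvClose6 = true :=
            (PySem.Chars.startswith_iff _ _).mpr hcs.2.1
          have hncc : ((nc.toNat : Int)) = nc := Int.toNat_of_nonneg hncnn
          by_cases hdz : d - 1 = 0
          · rw [loopA, dif_pos ⟨hd, hin⟩, dif_neg hc, dif_neg ho, if_pos hdz,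
              hskip, loopB, dif_pos hcllen, hclsw, if_pos rfl, if_pos hdz, hncc]
          · rw [loopA, dif_pos ⟨hd, hin⟩, dif_neg hc, dif_neg ho, if_neg hdz,
              hskip, loopB, dif_pos hcllen, hclsw, if_pos rfl, if_neg hdz]
            exact ih (nc.toNat + 6) (d - 1) (by omega) (by omega)
    · rw [loopA, dif_neg (by omega : ¬ (0 < d ∧ pos < s.length)),
        loopB, dif_neg hin]

-- ===== VERDICT (by name: the statement is the Claim_ definition above) =====
theorem extract_div_block_spec : Claim_equal_extract_div_block := by
  intro html class_attr _
  unfold Spec_extract_div_block extract_div_block extract_div_block_alt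
  by_cases hf : PySem.Chars.find html.toList (pvStartTag class_attr.toList) = -1
  · simp [hf]
  · simp only [if_neg hf]
    exact loopA_eq_loopB html.toList _ _ html.toList.length _ 1 (by omega) (by omega)
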